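-- pv_equiv track=rewrite | github.com/tknrsgym/quara | quara/interface/forest/api.py | generate_pauli_strings_from_povm_name
-- ===== SOURCE A (Python) =====
-- from typing import List, Tuple
--
-- def generate_pauli_strings_from_povm_name(povm_name: str) -> List[str]:
--     """Generates Pauli strings from given POVM name to construct a tomographical experiment.
--
--     Parameters
--     ----------
--     povm_name: str
--         Name of a POVM which is the target of the experiment.
--
--     Returns
--     -------
--     List[str]
--         List of Pauli strings for observation that covers sufficient information of the given POVM.
--     """
--     initial_string = "".join(povm_name.split("_")).upper()
--     allowed_chars = set("XYZ")
--     assert 0 < len(initial_string)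
--     assert set(initial_string) <= allowed_chars
--     swap_times = 2 ** len(initial_string)
--     pauli_strings = [initial_string]
--     for i in range(1, swap_times):
--         swap_position = f"{i:0{len(initial_string)}b}"
--         pauli_str = ""
--         for c, swap_flag in zip(initial_string, swap_position):
--             if swap_flag == "1":
--                 pauli_str = pauli_str + "I"
--             else:
--                 pauli_str = pauli_str + c
--         pauli_strings.append(pauli_str)
--     return pauli_strings
-- ===== SOURCE B (Python) =====
-- def generate_pauli_strings_from_povm_name(povm_name: str):
--     """Same result as A: all 2^n strings obtained by replacing subsets of the
--     Pauli characters by 'I', in A's binary-counting order, built by list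
--     doubling from the last position instead of formatting each index in binary."""
--     initial_string = "".join(povm_name.split("_")).upper()
--     allowed_chars = set("XYZ")
--     assert 0 < len(initial_string)
--     assert set(initial_string) <= allowed_chars
--     results = [""]
--     for c in reversed(initial_string):
--         results = [c + t for t in results] + ["I" + t for t in results]
--     return results
-- ===== Notes on version B (the rewrite author's own statement) =====
-- stated objective: alternative
-- what changed: Replaces the index loop that formats every i in range(2^n) as an n-bit binary string and rebuilds each output character by character with a list-doubling pass over the positions (a Cartesian-product expansion from the last character), producing the same 2^n strings in the same order with no per-item binary formatting.
import Mathlib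
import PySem

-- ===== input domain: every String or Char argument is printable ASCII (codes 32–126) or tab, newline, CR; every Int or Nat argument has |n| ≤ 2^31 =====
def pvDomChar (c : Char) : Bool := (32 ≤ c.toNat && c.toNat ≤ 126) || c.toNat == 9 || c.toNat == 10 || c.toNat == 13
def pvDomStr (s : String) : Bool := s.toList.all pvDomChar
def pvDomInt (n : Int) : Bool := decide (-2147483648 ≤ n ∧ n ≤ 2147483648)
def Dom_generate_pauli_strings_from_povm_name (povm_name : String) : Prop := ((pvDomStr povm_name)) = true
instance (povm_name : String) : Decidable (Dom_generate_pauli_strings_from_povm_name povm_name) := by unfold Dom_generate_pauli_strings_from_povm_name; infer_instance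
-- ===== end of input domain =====

-- B replaces the per-index binary formatting of A by a list-doubling product expansion; same list, same order.

-- ===== PORT A =====
-- shared preprocessing line of both Pythons: "".join(povm_name.split("_")).upper(), as a char list
def pvInitial (povm_name : String) : List Char :=
  PySem.Chars.upper (PySem.Chars.join [] (PySem.Chars.splitOn povm_name.toList ['_']))

-- f"{i:0{n}b}": exact for 0 ≤ i < 2^n, which holds for every i the loop of A visits
def pvBits : Nat → Nat → List Char
  | 0, _ => []
  | n+1, i => (if i / 2^n % 2 = 1 then '1' else '0') :: pvBits n i

-- the inner loop of A: pauli_str built left to right over zip(initial_string, swap_position)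
def pvBuild (s bits : List Char) : List Char :=
  (s.zip bits).foldl (fun acc p => acc ++ [if p.2 = '1' then 'I' else p.1]) []

-- loop counters from range(1, 2**n) are nonnegative, so .toNat is exact here
def generate_pauli_strings_from_povm_name (povm_name : String) : List String :=
  (PySem.List.pyRange 1 ((2^(pvInitial povm_name).length : Nat) : Int) 1).foldl
    (fun acc i => acc ++ [String.ofList (pvBuild (pvInitial povm_name) (pvBits (pvInitial povm_name).length i.toNat))])
    [String.ofList (pvInitial povm_name)]

-- ===== PORT B =====
def generate_pauli_strings_from_povm_name_alt (povm_name : String) : List String :=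
  ((pvInitial povm_name).reverse.foldl
      (fun results c => results.map (fun t => c :: t) ++ results.map (fun t => 'I' :: t))
      [[]]).map String.ofList

-- ===== PRECONDITION & SPEC =====
-- Pre_ excludes exactly the inputs on which A's two asserts raise AssertionError:
-- an initial string that is empty or contains a character other than X, Y, Z.
def Pre_generate_pauli_strings_from_povm_name (povm_name : String) : Prop :=
  pvInitial povm_name ≠ [] ∧ ((pvInitial povm_name).all (fun c => c = 'X' ∨ c = 'Y' ∨ c = 'Z')) = true
instance (povm_name : String) : Decidable (Pre_generate_pauli_strings_from_povm_name povm_name) := by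
  unfold Pre_generate_pauli_strings_from_povm_name; infer_instance
def pvWitness_generate_pauli_strings_from_povm_name : String := "zzzz_zzzz"

def Spec_generate_pauli_strings_from_povm_name (povm_name : String) (out : List String) : Prop := out = generate_pauli_strings_from_povm_name_alt povm_name
instance (povm_name : String) (out : List String) : Decidable (Spec_generate_pauli_strings_from_povm_name povm_name out) := by unfold Spec_generate_pauli_strings_from_povm_name; infer_instance

-- ===== CLAIM (what is proved, stated in full; the proofs are below) =====
def Claim_equal_generate_pauli_strings_from_povm_name : Prop := ∀ (povm_name : String), Dom_generate_pauli_strings_from_povm_name povm_name → Pre_generate_pauli_strings_from_povm_name povm_name → Spec_generate_pauli_strings_from_povm_name povm_name (generate_pauli_strings_from_povm_name povm_name)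

-- ===== LEMMAS AND PROOFS =====

def pvSel (c b : Char) : Char := if b = '1' then 'I' else c

-- structural form of B's doubling loop
def pvProd : List Char → List (List Char)
  | [] => [[]]
  | c :: cs => ((pvProd cs).map (fun t => c :: t)) ++ ((pvProd cs).map (fun t => 'I' :: t))

lemma pvBuild_eq_zipWith (s bits : List Char) : pvBuild s bits = List.zipWith pvSel s bits := by
  rw [pvBuild, PySem.List.foldl_append_singleton_eq_map]
  induction s generalizing bits with
  | nil => simp
  | cons c cs ih =>
    cases bits with
    | nil => simp
    | cons b bs =>
      simp only [List.zip_cons_cons, List.nil_append, List.zipWith_cons_cons]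
      simp only [pvSel]
      have := ih bs
      simp only [List.nil_append] at this
      simp [this]

lemma pvBits_ignore (n j : Nat) : pvBits n (2^n + j) = pvBits n j := by
  induction n generalizing j with
  | zero => rfl
  | succ n ih =>
    have h1 : (2^(n+1) + j) / 2^n = 2 + j / 2^n := by
      rw [pow_succ, mul_comm, Nat.add_comm, Nat.add_mul_div_right _ _ (Nat.two_pow_pos n), Nat.add_comm]
    have h2 : pvBits n (2^(n+1) + j) = pvBits n j := by
      have : 2^(n+1) + j = 2^n + (2^n + j) := by ring
      rw [this, ih, ih]
    have h3 : (2 + j / 2 ^ n) % 2 = j / 2 ^ n % 2 := by omega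
    simp only [pvBits, h1, h2, h3]

lemma pvBits_low (n i : Nat) (h : i < 2^n) : pvBits (n+1) i = '0' :: pvBits n i := by
  simp [pvBits, Nat.div_eq_of_lt h]

lemma pvBits_high (n j : Nat) (h : j < 2^n) : pvBits (n+1) (2^n + j) = '1' :: pvBits n j := by
  have h1 : (2^n + j) / 2^n = 1 := by
    rw [Nat.add_comm, Nat.add_div_right _ (Nat.two_pow_pos n), Nat.div_eq_of_lt h]
  simp [pvBits, h1, pvBits_ignore]

lemma pvMain (s : List Char) :
    (List.range (2^s.length)).map (fun i => List.zipWith pvSel s (pvBits s.length i)) = pvProd s := by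
  induction s with
  | nil => simp [pvProd]
  | cons c cs ih =>
    have hlen : (c :: cs).length = cs.length + 1 := rfl
    rw [hlen, pvProd, ← ih, pow_succ]
    have hsplit : List.range (2^cs.length * 2) = List.range (2^cs.length) ++ (List.range (2^cs.length)).map (fun k => 2^cs.length + k) := by
      rw [Nat.mul_two]; exact List.range_add
    rw [hsplit, List.map_append, List.map_map, List.map_map, List.map_map]
    congr 1
    · apply List.map_congr_left
      intro i hi
      rw [pvBits_low cs.length i (List.mem_range.mp hi)]
      simp [pvSel, List.zipWith]
    · apply List.map_congr_left
      intro j hj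
      simp only [Function.comp]
      rw [pvBits_high cs.length j (List.mem_range.mp hj)]
      simp [pvSel, List.zipWith]

lemma pvBits_zero_apply (s : List Char) : List.zipWith pvSel s (pvBits s.length 0) = s := by
  induction s with
  | nil => rfl
  | cons c cs ih =>
    have : (c :: cs).length = cs.length + 1 := rfl
    rw [this, pvBits_low cs.length 0 (Nat.two_pow_pos _)]
    simp [pvSel, List.zipWith, ih]

lemma pvFoldr_eq_pvProd (s : List Char) :
    List.foldr (fun c results => List.map (fun t => c :: t) results ++ List.map (fun t => 'I' :: t) results) [[]] s = pvProd s := by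
  induction s with
  | nil => rfl
  | cons c cs ih => simp [pvProd, ih]

-- ===== VERDICT (by name: the statement is the Claim_ definition above) =====
theorem generate_pauli_strings_from_povm_name_spec : Claim_equal_generate_pauli_strings_from_povm_name := by
  intro povm_name _ _
  unfold Spec_generate_pauli_strings_from_povm_name
  unfold generate_pauli_strings_from_povm_name generate_pauli_strings_from_povm_name_alt
  rw [List.foldl_reverse, pvFoldr_eq_pvProd]
  set s := pvInitial povm_name with hs
  clear_value s
  rw [PySem.List.foldl_append_singleton_eq_map, PySem.List.pyRange_one, List.map_map, ← pvMain s]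
  have hpow : ((2 ^ s.length : Nat) : Int) - 1 = ((2 ^ s.length - 1 : Nat) : Int) := by
    have := Nat.one_le_two_pow (n := s.length); push_cast [this]; ring
  rw [hpow, Int.toNat_natCast]
  have hrange : List.range (2 ^ s.length) = 0 :: List.map Nat.succ (List.range (2 ^ s.length - 1)) := by
    rw [← List.range_succ_eq_map, Nat.sub_add_cancel (Nat.one_le_two_pow)]
  rw [hrange]
  simp only [List.map_cons, List.map_map, List.singleton_append, pvBits_zero_apply]
  congr 1
  apply List.map_congr_left
  intro k _
  simp only [Function.comp]
  have ht : ((1 : Int) + (k : Int)).toNat = k + 1 := by omega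
  rw [pvBuild_eq_zipWith, ht]
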